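-- pv_equiv track=rewrite | github.com/learn-ukrainian/learn-ukrainian.github.io | scripts/pipeline/stress_annotator.py | _in_skip_range
-- ===== SOURCE A (Python) =====
-- def _in_skip_range(pos: int, skip_ranges: list[tuple[int, int]]) -> bool:
--     """Check if position falls within a skip range (binary search)."""
--     lo, hi = 0, len(skip_ranges) - 1
--     while lo <= hi:
--         mid = (lo + hi) // 2
--         s, e = skip_ranges[mid]
--         if pos < s:
--             hi = mid - 1
--         elif pos >= e:
--             lo = mid + 1
--         else:
--             return True
--     return False
-- ===== SOURCE B (Python) =====
-- def _in_skip_range(pos: int, skip_ranges: list[tuple[int, int]]) -> bool: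
--     """Check if position falls within a skip range.
--
--     Binary search phrased as recursion on a window (offset, count) instead of
--     A's mutable lo/hi bounds: the window of 'count' candidate ranges starting
--     at index 'offset' shrinks to its left half 'k' or right half 'count-1-k'.
--     It probes offset + (count-1)//2 = (lo+hi)//2, the same element A probes.
--     """
--     def go(offset: int, count: int) -> bool:
--         if count == 0:
--             return False
--         k = (count - 1) // 2
--         s, e = skip_ranges[offset + k]
--         if s <= pos < e:
--             return True
--         if pos < s:
--             return go(offset, k)
--         return go(offset + k + 1, count - 1 - k)
--     return go(0, len(skip_ranges))
-- ===== Notes on version B (the rewrite author's own statement) =====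
-- stated objective: alternative
-- what changed: A's iterative lo/hi binary search with mutable bounds becomes a recursion on a window (offset, count) over Nat-style sizes: it probes offset + (count-1)//2 (the same element as A's (lo+hi)//2) and recurses into the half-window of size k or count-1-k, with the hit test first.
import Mathlib
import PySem

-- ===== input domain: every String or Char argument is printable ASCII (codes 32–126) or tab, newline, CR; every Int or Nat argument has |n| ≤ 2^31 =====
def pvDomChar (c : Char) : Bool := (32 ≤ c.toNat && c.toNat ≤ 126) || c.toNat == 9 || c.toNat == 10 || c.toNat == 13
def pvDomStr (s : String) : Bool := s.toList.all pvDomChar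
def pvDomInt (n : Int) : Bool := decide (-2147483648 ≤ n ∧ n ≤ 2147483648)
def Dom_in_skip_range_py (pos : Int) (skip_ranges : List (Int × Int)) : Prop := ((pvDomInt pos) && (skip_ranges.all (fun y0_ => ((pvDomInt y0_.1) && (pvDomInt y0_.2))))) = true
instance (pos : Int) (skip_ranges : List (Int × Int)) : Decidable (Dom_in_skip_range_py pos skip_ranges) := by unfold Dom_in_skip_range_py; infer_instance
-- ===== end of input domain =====

-- B recasts A's iterative lo/hi binary search as a recursion on a shrinking window (offset, count) of Nat sizes, probing the same element offset+(count-1)//2 = (lo+hi)//2 (objective: alternative decomposition).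

-- ===== PORT A =====
-- the while loop of A: state (lo, hi), branches in A's order
def inSkipLoopA (pos : Int) (skip_ranges : List (Int × Int)) (lo hi : Int) : Bool :=
  if h : lo ≤ hi then
    let mid := PySem.Int.floordiv (lo + hi) 2
    match PySem.List.pyGet? skip_ranges mid with
    | none => false          -- IndexError: unreachable from the top-level call
    | some (s, e) =>
      if pos < s then inSkipLoopA pos skip_ranges lo (mid - 1)
      else if pos ≥ e then inSkipLoopA pos skip_ranges (mid + 1) hi
      else true
  else false
termination_by (hi + 1 - lo).toNat
decreasing_by
  · have := PySem.Int.floordiv_two_mid_bounds h; omega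
  · have := PySem.Int.floordiv_two_mid_bounds h; omega

def in_skip_range_py (pos : Int) (skip_ranges : List (Int × Int)) : Bool :=
  inSkipLoopA pos skip_ranges 0 ((skip_ranges.length : Int) - 1)

-- ===== PORT B =====
-- B's inner helper go(offset, count): a window of count candidate ranges starting at offset
def inSkipGoB (pos : Int) (skip_ranges : List (Int × Int)) (offset count : Nat) : Bool :=
  match count with
  | 0 => false
  | n + 1 =>
    let k := n / 2                     -- (count - 1) // 2
    match skip_ranges[offset + k]? with
    | none => false                    -- IndexError: unreachable from the top-level call
    | some (s, e) =>
      if s ≤ pos ∧ pos < e then true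
      else if pos < s then inSkipGoB pos skip_ranges offset k
      else inSkipGoB pos skip_ranges (offset + k + 1) (n - k)
termination_by count
decreasing_by
  · omega
  · omega

def in_skip_range_py_alt (pos : Int) (skip_ranges : List (Int × Int)) : Bool :=
  inSkipGoB pos skip_ranges 0 skip_ranges.length

-- ===== PRECONDITION & SPEC =====
def Spec_in_skip_range_py (pos : Int) (skip_ranges : List (Int × Int)) (out : Bool) : Prop := out = in_skip_range_py_alt pos skip_ranges
instance (pos : Int) (skip_ranges : List (Int × Int)) (out : Bool) : Decidable (Spec_in_skip_range_py pos skip_ranges out) := by unfold Spec_in_skip_range_py; infer_instance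

-- ===== CLAIM (what is proved, stated in full; the proofs are below) =====
def Claim_equal_in_skip_range_py : Prop := ∀ (pos : Int) (skip_ranges : List (Int × Int)), Dom_in_skip_range_py pos skip_ranges → Spec_in_skip_range_py pos skip_ranges (in_skip_range_py pos skip_ranges)

-- ===== LEMMAS AND PROOFS =====
-- Invariant-carrying equivalence: A's (lo, hi) window corresponds to B's (lo.toNat, (hi+1-lo).toNat) window.
theorem loopA_eq_goB (pos : Int) (skip_ranges : List (Int × Int)) (lo hi : Int)
    (hlo : 0 ≤ lo) (hhi : hi < (skip_ranges.length : Int)) :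
    inSkipLoopA pos skip_ranges lo hi = inSkipGoB pos skip_ranges lo.toNat (hi + 1 - lo).toNat := by
  induction lo, hi using inSkipLoopA.induct (pos := pos) (skip_ranges := skip_ranges) with
  | case1 lo hi h mid heq =>
      -- pyGet? = none is impossible: lo ≤ mid ≤ hi < len and 0 ≤ lo
      exfalso
      have hb := PySem.Int.floordiv_two_mid_bounds h
      simp only [mid] at heq
      rw [PySem.List.pyGet?_eq_some_getElem skip_ranges (by omega) (by omega)] at heq
      simp at heq
  | case2 lo hi h mid s e heq hlt ih =>
      simp only [mid] at heq ih
      have hb := PySem.Int.floordiv_two_mid_bounds h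
      have hmid : PySem.Int.floordiv (lo + hi) 2 = (lo + hi) / 2 :=
        PySem.Int.floordiv_eq_ediv_of_pos (by norm_num)
      obtain ⟨n, hn⟩ : ∃ n, (hi + 1 - lo).toNat = n + 1 := ⟨(hi - lo).toNat, by omega⟩
      have heqB : skip_ranges[lo.toNat + n / 2]? = some (s, e) := by
        have h2 := heq
        rw [PySem.List.pyGet?_of_nonneg skip_ranges
          (show (0:Int) ≤ PySem.Int.floordiv (lo + hi) 2 by omega)] at h2
        rw [show lo.toNat + n / 2 = (PySem.Int.floordiv (lo + hi) 2).toNat by omega]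
        exact h2
      rw [inSkipLoopA, dif_pos h, hn, inSkipGoB]
      simp only [heq, heqB]
      simp only [if_neg (show ¬ (s ≤ pos ∧ pos < e) by omega), if_pos hlt]
      rw [ih hlo (by omega), show (PySem.Int.floordiv (lo + hi) 2 - 1 + 1 - lo).toNat = n / 2 by omega]
  | case3 lo hi h mid s e heq hlt hge ih =>
      simp only [mid] at heq ih
      have hb := PySem.Int.floordiv_two_mid_bounds h
      have hmid : PySem.Int.floordiv (lo + hi) 2 = (lo + hi) / 2 :=
        PySem.Int.floordiv_eq_ediv_of_pos (by norm_num)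
      obtain ⟨n, hn⟩ : ∃ n, (hi + 1 - lo).toNat = n + 1 := ⟨(hi - lo).toNat, by omega⟩
      have heqB : skip_ranges[lo.toNat + n / 2]? = some (s, e) := by
        have h2 := heq
        rw [PySem.List.pyGet?_of_nonneg skip_ranges
          (show (0:Int) ≤ PySem.Int.floordiv (lo + hi) 2 by omega)] at h2
        rw [show lo.toNat + n / 2 = (PySem.Int.floordiv (lo + hi) 2).toNat by omega]
        exact h2
      rw [inSkipLoopA, dif_pos h, hn, inSkipGoB]
      simp only [heq, heqB]
      simp only [if_pos hge,
        if_neg (show ¬ (s ≤ pos ∧ pos < e) by omega), if_neg hlt]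
      rw [ih (by omega) hhi]
      congr 1
      · omega
      · omega
  | case4 lo hi h mid s e heq hlt hge =>
      simp only [mid] at heq
      have hb := PySem.Int.floordiv_two_mid_bounds h
      have hmid : PySem.Int.floordiv (lo + hi) 2 = (lo + hi) / 2 :=
        PySem.Int.floordiv_eq_ediv_of_pos (by norm_num)
      obtain ⟨n, hn⟩ : ∃ n, (hi + 1 - lo).toNat = n + 1 := ⟨(hi - lo).toNat, by omega⟩
      have heqB : skip_ranges[lo.toNat + n / 2]? = some (s, e) := by
        have h2 := heq
        rw [PySem.List.pyGet?_of_nonneg skip_ranges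
          (show (0:Int) ≤ PySem.Int.floordiv (lo + hi) 2 by omega)] at h2
        rw [show lo.toNat + n / 2 = (PySem.Int.floordiv (lo + hi) 2).toNat by omega]
        exact h2
      rw [inSkipLoopA, dif_pos h, hn, inSkipGoB]
      simp only [heq, heqB]
      simp only [if_neg hlt, if_neg hge, if_pos (show s ≤ pos ∧ pos < e by omega)]
  | case5 lo hi h =>
      rw [inSkipLoopA, dif_neg h]
      rw [show (hi + 1 - lo).toNat = 0 by omega, inSkipGoB]

-- ===== VERDICT (by name: the statement is the Claim_ definition above) =====
theorem in_skip_range_py_spec : Claim_equal_in_skip_range_py := by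
  intro pos skip_ranges _
  unfold Spec_in_skip_range_py in_skip_range_py in_skip_range_py_alt
  rw [loopA_eq_goB pos skip_ranges 0 ((skip_ranges.length : Int) - 1) le_rfl (by omega)]
  congr 1
  omega
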